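-- pv_equiv track=rewrite | github.com/samucj73/Samfacil | gerador_otimizado.py | quadrantes_ok
-- ===== SOURCE A (Python) =====
-- def quadrantes_ok(dezenas):
--     contagem = [0, 0, 0, 0]
--     for d in dezenas:
--         if d <= 10:
--             contagem[0] += 1
--         elif d <= 15:
--             contagem[1] += 1
--         elif d <= 20:
--             contagem[2] += 1
--         else:
--             contagem[3] += 1
--     return all(3 <= c <= 4 for c in contagem)
-- ===== SOURCE B (Python) =====
-- def quadrantes_ok(dezenas):
--     n = len(dezenas)
--     le10 = sum(1 for d in dezenas if d <= 10)
--     le15 = sum(1 for d in dezenas if d <= 15)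
--     le20 = sum(1 for d in dezenas if d <= 20)
--     counts = (le10, le15 - le10, le20 - le15, n - le20)
--     return all(3 <= c <= 4 for c in counts)
-- ===== Notes on version B (the rewrite author's own statement) =====
-- stated objective: alternative
-- what changed: Replaces the single-pass branch-chain bucket increments with cumulative threshold counts (number of elements <= 10, <= 15, <= 20) from which the four bucket sizes are recovered by subtracting adjacent cumulative counts; no branching, no mutable bucket array.
import Mathlib
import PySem

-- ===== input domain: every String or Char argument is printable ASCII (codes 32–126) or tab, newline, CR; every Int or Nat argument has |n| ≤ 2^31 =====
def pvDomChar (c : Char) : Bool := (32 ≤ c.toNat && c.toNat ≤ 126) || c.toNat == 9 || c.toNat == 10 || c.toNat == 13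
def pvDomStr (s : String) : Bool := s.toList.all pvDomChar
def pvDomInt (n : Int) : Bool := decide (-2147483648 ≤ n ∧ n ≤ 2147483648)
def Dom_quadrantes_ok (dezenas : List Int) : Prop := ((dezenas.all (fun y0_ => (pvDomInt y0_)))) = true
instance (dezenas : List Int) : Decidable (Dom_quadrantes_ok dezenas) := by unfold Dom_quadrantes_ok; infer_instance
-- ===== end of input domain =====

-- B replaces A's branch-chain bucket increments by cumulative threshold counts and
-- subtraction of adjacent cumulative counts (alternative decomposition, same cost).

-- ===== PORT A =====
-- A's loop over dezenas, maintaining the four bucket counters, branches in A's order.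
def pvLoopA : List Int → Int × Int × Int × Int → Int × Int × Int × Int
  | [], s => s
  | d :: rest, (a, b, c, e) =>
    if d ≤ 10 then pvLoopA rest (a + 1, b, c, e)
    else if d ≤ 15 then pvLoopA rest (a, b + 1, c, e)
    else if d ≤ 20 then pvLoopA rest (a, b, c + 1, e)
    else pvLoopA rest (a, b, c, e + 1)

def quadrantes_ok (dezenas : List Int) : Bool :=
  let s := pvLoopA dezenas (0, 0, 0, 0)
  decide (3 ≤ s.1 ∧ s.1 ≤ 4) && decide (3 ≤ s.2.1 ∧ s.2.1 ≤ 4) &&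
  decide (3 ≤ s.2.2.1 ∧ s.2.2.1 ≤ 4) && decide (3 ≤ s.2.2.2 ∧ s.2.2.2 ≤ 4)

-- ===== PORT B =====
def quadrantes_ok_alt (dezenas : List Int) : Bool :=
  let n : Int := dezenas.length
  let le10 : Int := dezenas.countP (fun d => decide (d ≤ 10))
  let le15 : Int := dezenas.countP (fun d => decide (d ≤ 15))
  let le20 : Int := dezenas.countP (fun d => decide (d ≤ 20))
  decide (3 ≤ le10 ∧ le10 ≤ 4) && decide (3 ≤ le15 - le10 ∧ le15 - le10 ≤ 4) &&
  decide (3 ≤ le20 - le15 ∧ le20 - le15 ≤ 4) && decide (3 ≤ n - le20 ∧ n - le20 ≤ 4)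

-- ===== PRECONDITION & SPEC =====
def Spec_quadrantes_ok (dezenas : List Int) (out : Bool) : Prop := out = quadrantes_ok_alt dezenas
instance (dezenas : List Int) (out : Bool) : Decidable (Spec_quadrantes_ok dezenas out) := by unfold Spec_quadrantes_ok; infer_instance

-- ===== CLAIM (what is proved, stated in full; the proofs are below) =====
def Claim_equal_quadrantes_ok : Prop := ∀ (dezenas : List Int), Dom_quadrantes_ok dezenas → Spec_quadrantes_ok dezenas (quadrantes_ok dezenas)

-- ===== LEMMAS AND PROOFS =====

-- A's loop state equals the accumulator plus the cumulative-count differences of the rest.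
theorem pvLoopA_eq (l : List Int) : ∀ (a b c e : Int),
    pvLoopA l (a, b, c, e) =
      (a + (l.countP (fun d => decide (d ≤ 10)) : Int),
       b + ((l.countP (fun d => decide (d ≤ 15)) : Int) - (l.countP (fun d => decide (d ≤ 10)) : Int)),
       c + ((l.countP (fun d => decide (d ≤ 20)) : Int) - (l.countP (fun d => decide (d ≤ 15)) : Int)),
       e + ((l.length : Int) - (l.countP (fun d => decide (d ≤ 20)) : Int))) := by
  induction l with
  | nil => intro a b c e; simp [pvLoopA]
  | cons x rest ih =>
    intro a b c e
    simp only [pvLoopA, List.countP_cons, List.length_cons]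
    split_ifs with h1 h2 h3 <;>
      simp only [ih] <;>
      refine Prod.ext ?_ (Prod.ext ?_ (Prod.ext ?_ ?_)) <;>
      simp_all <;> omega

-- ===== VERDICT (by name: the statement is the Claim_ definition above) =====
theorem quadrantes_ok_spec : Claim_equal_quadrantes_ok := by
  intro dezenas _
  unfold Spec_quadrantes_ok quadrantes_ok quadrantes_ok_alt
  simp only [pvLoopA_eq, zero_add]
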